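-- pv_equiv track=rewrite | github.com/Git-of-Thoughts/GoT-test | 0.py | solve
-- ===== SOURCE A (Python) =====
-- def solve(test_cases):
--     results = []
--     for test_case in test_cases:
--         n, words = test_case
--         start_with_0 = [word for word in words if word[0] == '0']
--         start_with_1 = [word for word in words if word[0] == '1']
--         if len(start_with_0) == 0 or len(start_with_1) == 0:
--             results.append((0, []))
--             continue
--         start_with_0.sort(key=lambda x: x[-1])
--         start_with_1.sort(key=lambda x: x[-1])
--         if start_with_0[-1][-1] == '0' and start_with_1[-1][-1] == '1':
--             results.append((0, []))
--         elif start_with_0[-1][-1] == '1' and start_with_1[-1][-1] == '0':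
--             if len(start_with_0) > len(start_with_1):
--                 results.append((1, [words.index(start_with_0[-1]) + 1]))
--             else:
--                 results.append((1, [words.index(start_with_1[-1]) + 1]))
--         else:
--             results.append((-1, []))
--     return results
-- ===== SOURCE B (Python) =====
-- def solve(test_cases):
--     # One linear scan per test case (no sorting): counts plus the last word attaining the
--     # maximal last character in each group replace the two sorts.
--     results = []
--     for n, words in test_cases:
--         c0 = c1 = 0
--         m0 = m1 = None  # (best last char, last word attaining it)
--         for w in words:
--             if w[0] == '0':
--                 c0 += 1
--                 if m0 is None or m0[0] <= w[-1]:
--                     m0 = (w[-1], w)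
--             elif w[0] == '1':
--                 c1 += 1
--                 if m1 is None or m1[0] <= w[-1]:
--                     m1 = (w[-1], w)
--         if c0 == 0 or c1 == 0:
--             results.append((0, []))
--         elif m0[0] == '0' and m1[0] == '1':
--             results.append((0, []))
--         elif m0[0] == '1' and m1[0] == '0':
--             w = m0[1] if c0 > c1 else m1[1]
--             results.append((1, [words.index(w) + 1]))
--         else:
--             results.append((-1, []))
--     return results
-- ===== Notes on version B (the rewrite author's own statement) =====
-- stated objective: alternative
-- what changed: Per test case, the two stable sorts (plus last-element reads) are replaced by one linear scan that tracks each group's count and the last word attaining the maximal last character; the branch logic and the words.index lookup are unchanged.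
import Mathlib
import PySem

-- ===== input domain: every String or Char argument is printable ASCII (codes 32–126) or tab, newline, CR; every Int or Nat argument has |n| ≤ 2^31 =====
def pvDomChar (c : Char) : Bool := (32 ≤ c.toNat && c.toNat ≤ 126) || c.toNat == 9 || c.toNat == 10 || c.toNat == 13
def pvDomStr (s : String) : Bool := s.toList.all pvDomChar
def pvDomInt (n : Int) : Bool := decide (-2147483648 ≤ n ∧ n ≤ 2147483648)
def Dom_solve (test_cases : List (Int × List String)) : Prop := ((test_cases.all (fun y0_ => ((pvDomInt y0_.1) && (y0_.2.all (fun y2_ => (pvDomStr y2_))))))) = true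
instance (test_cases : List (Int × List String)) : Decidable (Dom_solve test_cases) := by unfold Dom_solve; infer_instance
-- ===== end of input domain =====

-- B replaces A's two per-case stable sorts by one linear scan tracking each group's
-- count and the last word attaining the maximal last character (alternative algorithm,
-- same observed cost).

-- ===== PORT A =====
-- word[0] and word[-1]; exact on nonempty words (Pre_solve excludes empty words, on which Python raises IndexError)
def firstCh (w : String) : Char := (PySem.Str.pyGet? w 0).getD ' '
def lastCh (w : String) : Char := (PySem.Str.pyGet? w (-1)).getD ' '

-- the body of A's loop, one test case
def solveCase (tc : Int × List String) : Int × List Int :=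
  let words := tc.2
  let s0 := words.filter (fun w => firstCh w == '0')
  let s1 := words.filter (fun w => firstCh w == '1')
  if s0.length == 0 || s1.length == 0 then (0, [])
  else
    let t0 := PySem.List.sorted s0 (fun w => lastCh w)
    let t1 := PySem.List.sorted s1 (fun w => lastCh w)
    let a := PySem.List.pyGetD t0 (-1) ""
    let b := PySem.List.pyGetD t1 (-1) ""
    if lastCh a == '0' && lastCh b == '1' then (0, [])
    else if lastCh a == '1' && lastCh b == '0' then
      -- words.index never raises here: a/b is a member of words
      if s0.length > s1.length then
        (1, [(((PySem.List.index? words a).getD 0 : Nat) : Int) + 1])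
      else
        (1, [(((PySem.List.index? words b).getD 0 : Nat) : Int) + 1])
    else (-1, [])

def solve (test_cases : List (Int × List String)) : List (Int × List Int) :=
  test_cases.foldl (fun results tc => results ++ [solveCase tc]) []

-- ===== PORT B =====
-- update of the running (best last char, last word attaining it) pair
def bStep (m : Option (Char × String)) (w : String) : Option (Char × String) :=
  match m with
  | none => some (lastCh w, w)
  | some p => if p.1 ≤ lastCh w then some (lastCh w, w) else some p

-- the body of B's loop, one test case: a single scan, then the same branches
def solveCaseAlt (tc : Int × List String) : Int × List Int :=
  let words := tc.2
  let st := words.foldl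
    (fun (st : Int × Int × Option (Char × String) × Option (Char × String)) w =>
      if firstCh w == '0' then (st.1 + 1, st.2.1, bStep st.2.2.1 w, st.2.2.2)
      else if firstCh w == '1' then (st.1, st.2.1 + 1, st.2.2.1, bStep st.2.2.2 w)
      else st)
    (0, 0, none, none)
  if st.1 == 0 || st.2.1 == 0 then (0, [])
  else
    match st.2.2.1, st.2.2.2 with
    | some m0, some m1 =>
      if m0.1 == '0' && m1.1 == '1' then (0, [])
      else if m0.1 == '1' && m1.1 == '0' then
        let w := if st.1 > st.2.1 then m0.2 else m1.2
        (1, [(((PySem.List.index? words w).getD 0 : Nat) : Int) + 1])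
      else (-1, [])
    | _, _ => (-1, [])  -- unreachable: both counts are nonzero

def solve_alt (test_cases : List (Int × List String)) : List (Int × List Int) :=
  test_cases.foldl (fun results tc => results ++ [solveCaseAlt tc]) []

-- ===== PRECONDITION & SPEC =====
-- Pre_ excludes test cases containing an empty word, on which Python A (word[0]) raises IndexError.
def Pre_solve (test_cases : List (Int × List String)) : Prop :=
  ∀ tc ∈ test_cases, ∀ w ∈ tc.2, w ≠ ""
instance (test_cases : List (Int × List String)) : Decidable (Pre_solve test_cases) := by
  unfold Pre_solve; infer_instance

def pvWitness_solve : (List (Int × List String)) := [(2, ["01", "10"]), (1, ["11"])]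

def Spec_solve (test_cases : List (Int × List String)) (out : List (Int × List Int)) : Prop := out = solve_alt test_cases
instance (test_cases : List (Int × List String)) (out : List (Int × List Int)) : Decidable (Spec_solve test_cases out) := by unfold Spec_solve; infer_instance

-- ===== CLAIM (what is proved, stated in full; the proofs are below) =====
def Claim_equal_solve : Prop := ∀ (test_cases : List (Int × List String)), Dom_solve test_cases → Pre_solve test_cases → Spec_solve test_cases (solve test_cases)

-- ===== LEMMAS AND PROOFS =====

-- the invariant tying B's running best to the last element of A's sorted list
def BestInv (acc : List String) (m : Option (Char × String)) : Prop :=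
  (acc = [] ∧ m = none) ∨
  ∃ w, acc.getLast? = some w ∧ m = some (lastCh w, w) ∧ ∀ y ∈ acc, lastCh y ≤ lastCh w

-- one insertion step of A's sort (insertBy) preserves the invariant against one bStep
lemma insertBy_ne_nil (before : String → String → Bool) (x : String) (ys : List String) :
    PySem.List.insertBy before x ys ≠ [] := by
  cases ys with
  | nil => simp [PySem.List.insertBy]
  | cons y t => simp only [PySem.List.insertBy]; split_ifs <;> simp

lemma getLast?_insertBy (before : String → String → Bool) (x : String) :
    ∀ (acc : List String) (w : String), acc.getLast? = some w → before x w = true →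
      (PySem.List.insertBy before x acc).getLast? = some w := by
  intro acc
  induction acc with
  | nil => intro w hw; simp at hw
  | cons y t ih =>
    intro w hw hb
    simp only [PySem.List.insertBy]
    by_cases h : before x y = true
    · simp only [h, if_pos]
      cases t with
      | nil => simpa using hw
      | cons z t' => simpa [List.getLast?_cons_cons] using hw
    · simp only [h, if_neg, Bool.not_eq_true]
      cases t with
      | nil =>
        simp at hw; subst hw
        exact absurd hb (by simpa using h)
      | cons z t' =>
        have hw' : (z :: t').getLast? = some w := by
          simpa [List.getLast?_cons_cons] using hw
        have := ih w hw' hb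
        obtain ⟨u, us, hu⟩ := List.exists_cons_of_ne_nil (insertBy_ne_nil before x (z :: t'))
        rw [hu] at this ⊢
        simpa [List.getLast?_cons_cons] using this

lemma inv_step (acc : List String) (m : Option (Char × String)) (x : String)
    (h : BestInv acc m) :
    BestInv (PySem.List.insertBy (fun a b => decide (lastCh a < lastCh b)) x acc) (bStep m x) := by
  rcases h with ⟨rfl, rfl⟩ | ⟨w, hlast, rfl, hmax⟩
  · right
    refine ⟨x, ?_, rfl, ?_⟩
    · show (PySem.List.insertBy (fun a b => decide (lastCh a < lastCh b)) x []).getLast? = some x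
      simp only [PySem.List.insertBy]
      rfl
    · intro y hy
      rw [PySem.List.mem_insertBy] at hy
      rcases hy with rfl | hy
      · exact le_rfl
      · simp at hy
  · by_cases hle : lastCh w ≤ lastCh x
    · right
      refine ⟨x, ?_, ?_, ?_⟩
      · rw [PySem.List.insertBy_of_forall_not_before]
        · simp
        · intro y hy
          simp only [decide_eq_false_iff_not, not_lt]
          exact le_trans (le_trans (hmax y hy) hle) le_rfl
      · simp [bStep, hle]
      · intro y hy
        rw [PySem.List.mem_insertBy] at hy
        rcases hy with rfl | hy
        · exact le_rfl
        · exact le_trans (hmax y hy) hle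
    · rw [not_le] at hle
      right
      refine ⟨w, ?_, ?_, ?_⟩
      · exact getLast?_insertBy _ x acc w hlast (by simpa using hle)
      · simp [bStep, not_le.mpr hle]
      · intro y hy
        rw [PySem.List.mem_insertBy] at hy
        rcases hy with rfl | hy
        · exact le_of_lt hle
        · exact hmax y hy

lemma inv_foldl (l : List String) :
    ∀ (acc : List String) (m : Option (Char × String)), BestInv acc m →
      BestInv (l.foldl (fun acc x => PySem.List.insertBy (fun a b => decide (lastCh a < lastCh b)) x acc) acc)
          (l.foldl bStep m) := by
  induction l with
  | nil => intro acc m h; exact h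
  | cons x t ih => intro acc m h; exact ih _ _ (inv_step acc m x h)

-- the best pair of a nonempty list l is exactly (last char of, the) last element of sorted(l, key=last char)
lemma best_eq_sorted_last (l : List String) (hl : l ≠ []) :
    ∃ w, (PySem.List.sorted l (fun w => lastCh w)).getLast? = some w ∧
      l.foldl bStep none = some (lastCh w, w) := by
  have h := inv_foldl l [] none (Or.inl ⟨rfl, rfl⟩)
  rw [← PySem.List.sorted_eq_foldl_insertBy] at h
  rcases h with ⟨hnil, _⟩ | ⟨w, h1, h2, _⟩
  · exact absurd ((PySem.List.sorted_eq_nil_iff l (fun w => lastCh w) false).mp hnil) hl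
  · exact ⟨w, h1, h2⟩

-- B's single scan splits into the two filtered groups
lemma scan_split (words : List String) :
    ∀ (c0 c1 : Int) (m0 m1 : Option (Char × String)),
      words.foldl
        (fun (st : Int × Int × Option (Char × String) × Option (Char × String)) w =>
          if firstCh w == '0' then (st.1 + 1, st.2.1, bStep st.2.2.1 w, st.2.2.2)
          else if firstCh w == '1' then (st.1, st.2.1 + 1, st.2.2.1, bStep st.2.2.2 w)
          else st)
        (c0, c1, m0, m1)
      = (c0 + ((words.filter (fun w => firstCh w == '0')).length : Int),
         c1 + ((words.filter (fun w => firstCh w == '1')).length : Int),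
         (words.filter (fun w => firstCh w == '0')).foldl bStep m0,
         (words.filter (fun w => firstCh w == '1')).foldl bStep m1) := by
  induction words with
  | nil => intro c0 c1 m0 m1; simp
  | cons w t ih =>
    intro c0 c1 m0 m1
    simp only [List.foldl_cons, List.filter_cons]
    by_cases h0 : (firstCh w == '0') = true
    · have h1 : (firstCh w == '1') = false := by
        simp only [beq_iff_eq] at h0 ⊢
        simp [h0]
      simp only [h0, h1, if_true, Bool.false_eq_true, if_false, ih, List.foldl_cons,
        List.length_cons]
      simp [Prod.mk.injEq]; omega
    · have h0' : (firstCh w == '0') = false := by simpa using h0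
      by_cases h1 : (firstCh w == '1') = true
      · simp only [h0', h1, if_true, Bool.false_eq_true, if_false, ih, List.foldl_cons,
          List.length_cons]
        simp [Prod.mk.injEq]; omega
      · have h1' : (firstCh w == '1') = false := by simpa using h1
        simp only [h0', h1', Bool.false_eq_true, if_false, ih]

-- the two per-case bodies agree
lemma case_eq (tc : Int × List String) : solveCase tc = solveCaseAlt tc := by
  unfold solveCase solveCaseAlt
  simp only [scan_split, zero_add]
  set words := tc.2
  set l0 := words.filter (fun w => firstCh w == '0') with hl0
  set l1 := words.filter (fun w => firstCh w == '1') with hl1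
  by_cases hz : l0.length == 0 || l1.length == 0
  · have hz' : ((l0.length : Int) == 0 || (l1.length : Int) == 0) = true := by
      rw [Bool.or_eq_true] at hz
      rcases hz with h | h <;>
        simp only [beq_iff_eq] at h <;> simp [h]
    simp [hz, hz']
  · have hz0 : l0.length ≠ 0 := by
      intro h; apply hz; simp [h]
    have hz1 : l1.length ≠ 0 := by
      intro h; apply hz; simp [h]
    have hz' : ((l0.length : Int) == 0 || (l1.length : Int) == 0) = false := by
      simp only [Bool.or_eq_false_iff, beq_eq_false_iff_ne, ne_eq]
      constructor <;> intro h
      · exact hz0 (by exact_mod_cast h)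
      · exact hz1 (by exact_mod_cast h)
    obtain ⟨w0, hw0s, hw0b⟩ := best_eq_sorted_last l0 (List.length_eq_zero_iff.not.mp (by simpa using hz0) )
    obtain ⟨w1, hw1s, hw1b⟩ := best_eq_sorted_last l1 (List.length_eq_zero_iff.not.mp (by simpa using hz1) )
    have ht0 : PySem.List.sorted l0 (fun w => lastCh w) ≠ [] := by
      intro h; rw [h] at hw0s; simp at hw0s
    have ht1 : PySem.List.sorted l1 (fun w => lastCh w) ≠ [] := by
      intro h; rw [h] at hw1s; simp at hw1s
    have ha : PySem.List.pyGetD (PySem.List.sorted l0 (fun w => lastCh w)) (-1) "" = w0 := by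
      rw [PySem.List.pyGetD_neg_one _ _ ht0]
      exact Option.some.inj (by rw [← List.getLast?_eq_some_getLast ht0]; exact hw0s)
    have hb : PySem.List.pyGetD (PySem.List.sorted l1 (fun w => lastCh w)) (-1) "" = w1 := by
      rw [PySem.List.pyGetD_neg_one _ _ ht1]
      exact Option.some.inj (by rw [← List.getLast?_eq_some_getLast ht1]; exact hw1s)
    have hgt : ((l0.length : Int) > (l1.length : Int)) = (l0.length > l1.length) := by
      simp
    simp only [hz, hz', Bool.false_eq_true, if_false, hw0b, hw1b, ha, hb]
    by_cases hc : l0.length > l1.length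
    · simp [hc, Int.ofNat_lt.mpr hc]
    · have : ¬ ((l1.length : Int) < (l0.length : Int)) := by exact_mod_cast hc
      simp [hc, this]

-- ===== VERDICT (by name: the statement is the Claim_ definition above) =====
theorem solve_spec : Claim_equal_solve := by
  intro tcs _ _
  show solve tcs = solve_alt tcs
  unfold solve solve_alt
  simp only [case_eq]
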